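-- pv_equiv track=rewrite | github.com/MathijsMul/mol-thesis | generate_data/generate_arithmetic_data.py | allbinarytrees
-- ===== SOURCE A (Python) =====
-- def allbinarytrees(s):
--     if len(s) == 1:
--         yield s
--     else:
--         for i in range(1, len(s), 2):
--             for l in allbinarytrees(s[:i]):
--                 for r in allbinarytrees(s[i+1:]):
--                     yield '({}{}{})'.format(l, s[i], r)
-- ===== SOURCE B (Python) =====
-- def allbinarytrees(s):
--     # Bottom-up interval DP: dp[(i, L)] holds all parenthesizations of s[i:i+L]
--     # for odd L, filled by increasing length; same output order as the recursion.
--     n = len(s)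
--     dp = {}
--     for i in range(n):
--         dp[(i, 1)] = [s[i]]
--     for L in range(3, n + 1, 2):
--         for i in range(n - L + 1):
--             cur = []
--             for k in range(1, L, 2):
--                 for left in dp[(i, k)]:
--                     for right in dp[(i + k + 1, L - k - 1)]:
--                         cur.append('({}{}{})'.format(left, s[i + k], right))
--             dp[(i, L)] = cur
--     yield from dp.get((0, n), [])
-- ===== Notes on version B (the rewrite author's own statement) =====
-- stated objective: alternative
-- what changed: Replaces A's top-down recursive generator over string slices (recomputing each substring's parenthesizations exponentially often) with a bottom-up interval dynamic-programming table keyed by (start, length), filled by increasing length and read out for the full range, producing the identical sequence of strings.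
import Mathlib
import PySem

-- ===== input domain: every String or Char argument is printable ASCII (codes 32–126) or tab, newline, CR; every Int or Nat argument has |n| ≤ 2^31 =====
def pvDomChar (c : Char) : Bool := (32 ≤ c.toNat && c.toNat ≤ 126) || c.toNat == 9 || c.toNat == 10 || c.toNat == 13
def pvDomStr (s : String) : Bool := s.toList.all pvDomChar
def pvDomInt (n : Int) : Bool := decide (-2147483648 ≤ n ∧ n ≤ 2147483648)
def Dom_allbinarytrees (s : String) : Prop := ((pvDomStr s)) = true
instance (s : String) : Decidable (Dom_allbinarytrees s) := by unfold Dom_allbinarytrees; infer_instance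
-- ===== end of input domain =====

-- B replaces A's top-down recursion on string slices by a bottom-up interval DP table keyed by
-- (start, length), filled in increasing length, yielding the same list of strings in the same order
-- (objective: alternative). Both generators are compared as the list of yielded strings.

-- ===== PORT A =====
-- fuel = recursion depth bound (s.toList.length suffices); it only makes A's recursion structural.
def pvAGo : Nat → List Char → List (List Char)
  | 0, _ => []
  | f + 1, cs =>
    if cs.length = 1 then [cs]
    else
      (PySem.List.pyRange 1 (cs.length : Int) 2).foldl
        (fun acc i =>
          (pvAGo f (PySem.List.slice cs none (some i))).foldl
            (fun acc l =>
              (pvAGo f (PySem.List.slice cs (some (i + 1)) none)).foldl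
                (fun acc r => acc ++ [('(' :: l) ++ [PySem.List.pyGetD cs i ' '] ++ r ++ [')']])
                acc)
            acc)
        []

def allbinarytrees (s : String) : List String :=
  (pvAGo s.toList.length s.toList).map String.ofList

-- ===== PORT B =====
-- named loop bodies of Source B: pvCombineB = the `cur` accumulation for one (i, L) table entry,
-- pvBodyI = one iteration of the `i` loop, pvBodyL = one iteration of the `L` loop
def pvCombineB (cs : List Char) (d : PySem.Dict (Int × Int) (List (List Char))) (L i : Int) :
    List (List Char) :=
  (PySem.List.pyRange 1 L 2).foldl
    (fun cur k =>
      (d.getD (i, k) []).foldl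
        (fun cur l =>
          (d.getD (i + k + 1, L - k - 1) []).foldl
            (fun cur r => cur ++ [('(' :: l) ++ [PySem.List.pyGetD cs (i + k) ' '] ++ r ++ [')']])
            cur)
        cur)
    []

def pvBodyI (cs : List Char) (L : Int) (d : PySem.Dict (Int × Int) (List (List Char))) (i : Int) :
    PySem.Dict (Int × Int) (List (List Char)) :=
  d.insert (i, L) (pvCombineB cs d L i)

def pvBodyL (cs : List Char) (d : PySem.Dict (Int × Int) (List (List Char))) (L : Int) :
    PySem.Dict (Int × Int) (List (List Char)) :=
  (PySem.List.pyRange 0 ((cs.length : Int) - L + 1) 1).foldl (pvBodyI cs L) d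

def allbinarytrees_alt (s : String) : List String :=
  let cs := s.toList
  let n : Int := (cs.length : Int)
  let d1 : PySem.Dict (Int × Int) (List (List Char)) :=
    (PySem.List.pyRange 0 n 1).foldl
      (fun d i => PySem.Dict.insert d (i, (1:Int)) [[PySem.List.pyGetD cs i ' ']])
      PySem.Dict.empty
  let d2 := (PySem.List.pyRange 3 (n + 1) 2).foldl (pvBodyL cs) d1
  (d2.getD (0, n) []).map String.ofList

-- ===== PRECONDITION & SPEC =====
def Spec_allbinarytrees (s : String) (out : List String) : Prop := out = allbinarytrees_alt s
instance (s : String) (out : List String) : Decidable (Spec_allbinarytrees s out) := by unfold Spec_allbinarytrees; infer_instance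

-- ===== CLAIM (what is proved, stated in full; the proofs are below) =====
def Claim_equal_allbinarytrees : Prop := ∀ (s : String), Dom_allbinarytrees s → Spec_allbinarytrees s (allbinarytrees s)

-- ===== LEMMAS AND PROOFS =====

lemma pyRange_one_zero_two : PySem.List.pyRange 1 0 2 = [] := by decide

lemma pvAGo_nil (f : Nat) : pvAGo f ([] : List Char) = [] := by
  cases f <;> simp [pvAGo, pyRange_one_zero_two]

lemma pvAGo_fuel (m : Nat) : ∀ (cs : List Char) (f g : Nat),
    cs.length ≤ m → cs.length ≤ f → cs.length ≤ g → pvAGo f cs = pvAGo g cs := by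
  induction m with
  | zero =>
    intro cs f g hm _ _
    have : cs = [] := List.length_eq_zero_iff.mp (by omega)
    subst this; rw [pvAGo_nil, pvAGo_nil]
  | succ m ih =>
    intro cs f g hm hf hg
    rcases Nat.eq_zero_or_pos cs.length with h0 | hpos
    · have : cs = [] := List.length_eq_zero_iff.mp h0
      subst this; rw [pvAGo_nil, pvAGo_nil]
    · obtain ⟨f', rfl⟩ : ∃ f', f = f' + 1 := ⟨f - 1, by omega⟩
      obtain ⟨g', rfl⟩ : ∃ g', g = g' + 1 := ⟨g - 1, by omega⟩
      by_cases h1 : cs.length = 1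
      · simp [pvAGo, h1]
      · simp only [pvAGo, if_neg h1]
        apply PySem.List.foldl_congr_mem
        intro acc i hi
        rw [PySem.List.mem_pyRange_iff_of_pos (by norm_num)] at hi
        obtain ⟨hi1, hi2, -⟩ := hi
        rw [PySem.List.slice_to cs (by omega), PySem.List.slice_from cs (by omega)]
        have hlt : (cs.take i.toNat).length ≤ cs.length - 1 := by
          simp [List.length_take]; omega
        have hld : (cs.drop (i+1).toNat).length ≤ cs.length - 1 := by
          simp [List.length_drop]; omega
        rw [ih _ f' g' (by omega) (by omega) (by omega),
            ih _ f' g' (by omega) (by omega) (by omega)]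

lemma pvAGo_even (m : Nat) : ∀ (cs : List Char) (f : Nat),
    cs.length ≤ m → cs.length ≤ f → cs.length % 2 = 0 → pvAGo f cs = [] := by
  induction m with
  | zero =>
    intro cs f hm _ _
    have : cs = [] := List.length_eq_zero_iff.mp (by omega)
    subst this; exact pvAGo_nil f
  | succ m ih =>
    intro cs f hm hf hev
    rcases Nat.eq_zero_or_pos cs.length with h0 | hpos
    · have : cs = [] := List.length_eq_zero_iff.mp h0
      subst this; exact pvAGo_nil f
    · obtain ⟨f', rfl⟩ : ∃ f', f = f' + 1 := ⟨f - 1, by omega⟩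
      have h1 : cs.length ≠ 1 := by omega
      simp only [pvAGo, if_neg h1]
      rw [PySem.List.foldl_congr_mem _ _ (fun acc _ => acc) _ ?_]
      · exact PySem.List.foldl_ignore _ _
      · intro acc i hi
        rw [PySem.List.mem_pyRange_iff_of_pos (by norm_num)] at hi
        obtain ⟨hi1, hi2, hdvd⟩ := hi
        rw [PySem.List.slice_from cs (by omega)]
        have hodd : i % 2 = 1 := by omega
        have hr : pvAGo f' (cs.drop (i+1).toNat) = [] := by
          apply ih _ f' (by simp [List.length_drop]; omega) (by simp [List.length_drop]; omega)
          simp [List.length_drop]; omega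
        rw [hr]
        simp

def pvInv (cs : List Char) (d : PySem.Dict (Int × Int) (List (List Char))) (M : Int) : Prop :=
  (∀ i ℓ : Int, 0 ≤ i → 1 ≤ ℓ → ℓ ≤ M → ℓ % 2 = 1 → i + ℓ ≤ (cs.length : Int) →
      d.getD (i, ℓ) [] = pvAGo cs.length ((cs.drop i.toNat).take ℓ.toNat)) ∧
  (∀ i ℓ : Int, ℓ % 2 = 0 → d.getD (i, ℓ) [] = [])

lemma pv_d1_getD (cs : List Char) (j : Nat) (i ℓ : Int) :
    (((List.range j).foldl
        (fun d (k : Nat) => PySem.Dict.insert d ((k : Int), (1:Int)) [[PySem.List.pyGetD cs (k : Int) ' ']])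
        PySem.Dict.empty)).getD (i, ℓ) [] =
      if ℓ = 1 ∧ 0 ≤ i ∧ i < (j : Int) then [[PySem.List.pyGetD cs i ' ']] else [] := by
  induction j with
  | zero => simp [PySem.Dict.getD_empty]
  | succ j ih =>
    rw [List.range_succ, List.foldl_append]
    simp only [List.foldl_cons, List.foldl_nil]
    rw [PySem.Dict.getD_insert]
    by_cases h : (i, ℓ) = ((j : Int), (1:Int))
    · obtain ⟨rfl, rfl⟩ : i = (j:Int) ∧ ℓ = 1 := by
        exact ⟨congrArg Prod.fst h, congrArg Prod.snd h⟩
      rw [if_pos h, if_pos ⟨rfl, by positivity, by push_cast; omega⟩]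
    · rw [if_neg h, ih]
      have hne : ¬(i = (j:Int) ∧ ℓ = 1) := by
        intro ⟨h1, h2⟩; exact h (by rw [h1, h2])
      by_cases hc : ℓ = 1 ∧ 0 ≤ i ∧ i < (j : Int)
      · rw [if_pos hc, if_pos ⟨hc.1, hc.2.1, by push_cast; omega⟩]
      · rw [if_neg hc]
        by_cases hc2 : ℓ = 1 ∧ 0 ≤ i ∧ i < ((j : Nat) + 1 : Int)
        · exfalso
          obtain ⟨rfl, hi0, hi1⟩ := hc2
          have : i = (j : Int) := by omega
          exact hne ⟨this, rfl⟩
        · rw [if_neg (by push_cast at hc2 ⊢; exact hc2)]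

lemma pv_inv_d1 (cs : List Char) :
    pvInv cs
      ((PySem.List.pyRange 0 (cs.length : Int) 1).foldl
        (fun d i => PySem.Dict.insert d (i, (1:Int)) [[PySem.List.pyGetD cs i ' ']])
        PySem.Dict.empty) 1 := by
  rw [PySem.List.pyRange_zero_natCast, List.foldl_map]
  constructor
  · intro i ℓ hi0 hℓ1 hℓM hodd hsum
    have hℓ : ℓ = 1 := by omega
    subst hℓ
    rw [pv_d1_getD, if_pos ⟨rfl, hi0, by omega⟩]
    have hilt : i.toNat < cs.length := by omega
    obtain ⟨f, hf⟩ : ∃ f, cs.length = f + 1 := ⟨cs.length - 1, by omega⟩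
    have hdrop : cs.drop i.toNat = cs[i.toNat] :: cs.drop (i.toNat + 1) :=
      List.drop_eq_getElem_cons hilt
    rw [hf, hdrop]
    show _ = pvAGo (f+1) _
    simp only [pvAGo, Int.toNat_one, List.take_succ_cons, List.take_zero, List.length_cons,
      List.length_nil]
    rw [PySem.List.pyGetD_eq_getElem cs ' ' hi0 (by omega)]
    simp
  · intro i ℓ hev
    rw [pv_d1_getD, if_neg (by omega)]

lemma pvCombine (cs : List Char) (d : PySem.Dict (Int × Int) (List (List Char))) (i L : Int)
    (hI : ∀ i' ℓ : Int, 0 ≤ i' → 1 ≤ ℓ → ℓ ≤ L - 2 → ℓ % 2 = 1 → i' + ℓ ≤ (cs.length : Int) →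
      d.getD (i', ℓ) [] = pvAGo cs.length ((cs.drop i'.toNat).take ℓ.toNat))
    (hi : 0 ≤ i) (hL3 : 3 ≤ L) (hodd : L % 2 = 1) (hiL : i + L ≤ (cs.length : Int)) :
    (PySem.List.pyRange 1 L 2).foldl
      (fun cur k =>
        (d.getD (i, k) []).foldl
          (fun cur l =>
            (d.getD (i + k + 1, L - k - 1) []).foldl
              (fun cur r => cur ++ [('(' :: l) ++ [PySem.List.pyGetD cs (i + k) ' '] ++ r ++ [')']])
              cur)
          cur)
      [] = pvAGo cs.length ((cs.drop i.toNat).take L.toNat) := by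
  set X := (cs.drop i.toNat).take L.toNat with hX
  have hXlen : X.length = L.toNat := by
    simp [hX, List.length_take, List.length_drop]; omega
  obtain ⟨f, hf⟩ : ∃ f, cs.length = f + 1 := ⟨cs.length - 1, by omega⟩
  have hfuel : cs.length = f + 1 := hf
  rw [hfuel]
  show _ = pvAGo (f + 1) X
  have hX1 : X.length ≠ 1 := by omega
  simp only [pvAGo, if_neg hX1]
  have hcast : (X.length : Int) = L := by rw [hXlen]; omega
  rw [hcast]
  symm
  apply PySem.List.foldl_congr_mem
  intro acc k hk
  rw [PySem.List.mem_pyRange_iff_of_pos (by norm_num)] at hk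
  obtain ⟨hk1, hk2, hkd⟩ := hk
  have hkodd : k % 2 = 1 := by omega
  have hkle : k ≤ L - 2 := by omega
  -- left slice
  have hleft : PySem.List.slice X none (some k) = (cs.drop i.toNat).take k.toNat := by
    rw [PySem.List.slice_to X (by omega), hX, List.take_take]
    congr 1; omega
  -- right slice
  have hright : PySem.List.slice X (some (k + 1)) none
      = (cs.drop (i + k + 1).toNat).take (L - k - 1).toNat := by
    rw [PySem.List.slice_from X (by omega), hX, List.drop_take, List.drop_drop]
    have e1 : L.toNat - (k + 1).toNat = (L - k - 1).toNat := by omega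
    have e2 : i.toNat + (k + 1).toNat = (i + k + 1).toNat := by omega
    rw [e1, e2]
  have hLf : pvAGo f ((cs.drop i.toNat).take k.toNat) = d.getD (i, k) [] := by
    rw [pvAGo_fuel cs.length _ f cs.length (by simp only [List.length_take, List.length_drop]; omega)
      (by simp only [List.length_take, List.length_drop]; omega)
      (by simp only [List.length_take, List.length_drop]; omega)]
    rw [hI i k hi hk1 hkle hkodd (by omega)]
  have hRf : pvAGo f ((cs.drop (i + k + 1).toNat).take (L - k - 1).toNat)
      = d.getD (i + k + 1, L - k - 1) [] := by
    rw [pvAGo_fuel cs.length _ f cs.length (by simp only [List.length_take, List.length_drop]; omega)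
      (by simp only [List.length_take, List.length_drop]; omega)
      (by simp only [List.length_take, List.length_drop]; omega)]
    rw [hI (i + k + 1) (L - k - 1) (by omega) (by omega) (by omega) (by omega) (by omega)]
  have hget : PySem.List.pyGetD X k ' ' = PySem.List.pyGetD cs (i + k) ' ' := by
    rw [PySem.List.pyGetD_eq_getElem X ' ' (by omega) (by omega),
        PySem.List.pyGetD_eq_getElem cs ' ' (by omega) (by omega)]
    simp only [hX, List.getElem_take, List.getElem_drop]
    congr 1; omega
  rw [hleft, hright, hLf, hRf, hget]

-- ===== B-side helpers (named loop bodies of Source B) =====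

lemma pvCombineB_congr (cs : List Char) (d d' : PySem.Dict (Int × Int) (List (List Char)))
    (L i : Int)
    (h : ∀ i' ℓ : Int, ℓ ≠ L → d.getD (i', ℓ) [] = d'.getD (i', ℓ) []) :
    pvCombineB cs d L i = pvCombineB cs d' L i := by
  unfold pvCombineB
  apply PySem.List.foldl_congr_mem
  intro acc k hk
  rw [PySem.List.mem_pyRange_iff_of_pos (by norm_num)] at hk
  rw [h i k (by omega), h (i + k + 1) (L - k - 1) (by omega)]

lemma pvStepI (cs : List Char) (d : PySem.Dict (Int × Int) (List (List Char))) (L : Int)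
    (hL3 : 3 ≤ L) (hLn : L ≤ (cs.length : Int)) (hodd : L % 2 = 1)
    (hI : pvInv cs d (L - 2)) :
    pvInv cs (pvBodyL cs d L) L := by
  obtain ⟨hI1, hI2⟩ := hI
  have hm : (cs.length : Int) - L + 1 = ((((cs.length : Int) - L + 1).toNat : Nat) : Int) := by
    omega
  set m : Nat := ((cs.length : Int) - L + 1).toNat with hmdef
  unfold pvBodyL
  rw [hm, PySem.List.pyRange_zero_natCast, List.foldl_map]
  have key : ∀ j : Nat, j ≤ m →
      (∀ i ℓ : Int, ℓ ≠ L →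
        ((List.range j).foldl (fun d (k : Nat) => pvBodyI cs L d (k : Int)) d).getD (i, ℓ) []
          = d.getD (i, ℓ) []) ∧
      (∀ i : Int, 0 ≤ i → i < (j : Int) →
        ((List.range j).foldl (fun d (k : Nat) => pvBodyI cs L d (k : Int)) d).getD (i, L) []
          = pvAGo cs.length ((cs.drop i.toNat).take L.toNat)) := by
    intro j
    induction j with
    | zero => exact fun _ => ⟨fun i ℓ _ => rfl, fun i _ h => by omega⟩
    | succ j ihj =>
      intro hjm
      obtain ⟨ih1, ih2⟩ := ihj (by omega)
      rw [List.range_succ, List.foldl_append]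
      simp only [List.foldl_cons, List.foldl_nil]
      set dj := (List.range j).foldl (fun d (k : Nat) => pvBodyI cs L d (k : Int)) d with hdj
      have hcur : pvCombineB cs dj L (j : Int)
          = pvAGo cs.length ((cs.drop (j : Int).toNat).take L.toNat) := by
        rw [pvCombineB_congr cs dj d L (j : Int) (fun i' ℓ h => ih1 i' ℓ h)]
        exact pvCombine cs d (j : Int) L hI1 (by positivity) hL3 hodd (by omega)
      constructor
      · intro i ℓ hne
        unfold pvBodyI
        rw [PySem.Dict.getD_insert]
        rw [if_neg (by simp [Prod.ext_iff]; intro _ h; exact absurd h hne), ih1 i ℓ hne]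
      · intro i hi0 hij
        unfold pvBodyI
        rw [PySem.Dict.getD_insert]
        by_cases hij' : i = (j : Int)
        · subst hij'
          rw [if_pos (by simp), hcur]
        · rw [if_neg (by simp [Prod.ext_iff]; intro h; exact absurd h hij'), ih2 i hi0 (by omega)]
  obtain ⟨k1, k2⟩ := key m le_rfl
  constructor
  · intro i ℓ hi0 hℓ1 hℓM hℓodd hsum
    by_cases hℓL : ℓ = L
    · subst hℓL
      rw [k2 i hi0 (by omega)]
    · have : ℓ ≤ L - 2 := by omega
      rw [k1 i ℓ hℓL, hI1 i ℓ hi0 hℓ1 this hℓodd hsum]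
  · intro i ℓ hev
    rw [k1 i ℓ (by omega), hI2 i ℓ hev]

lemma pvLoopL (cs : List Char) (d : PySem.Dict (Int × Int) (List (List Char)))
    (hI : pvInv cs d 1) :
    ∃ M : Int, ((cs.length : Int) % 2 = 1 → (cs.length : Int) ≤ M) ∧
      pvInv cs ((PySem.List.pyRange 3 ((cs.length : Int) + 1) 2).foldl (pvBodyL cs) d) M := by
  set n : Int := (cs.length : Int) with hn
  rw [PySem.List.pyRange_of_pos 3 (n + 1) (by norm_num)]
  set C : Nat := if 3 < n + 1 then ((n + 1 - 3 + 2 - 1) / 2).toNat else 0 with hC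
  rw [List.foldl_map]
  have aux : ∀ j : Nat, j ≤ C →
      pvInv cs ((List.range j).foldl (fun d (k : Nat) => pvBodyL cs d (3 + 2 * (k : Int))) d)
        (2 * (j : Int) + 1) := by
    intro j
    induction j with
    | zero => exact fun _ => hI
    | succ j ihj =>
      intro hjC
      rw [List.range_succ, List.foldl_append]
      simp only [List.foldl_cons, List.foldl_nil]
      have hCpos : 0 < C := by omega
      have h3n : 3 < n + 1 := by
        by_contra h
        rw [hC] at hCpos; rw [if_neg h] at hCpos; omega
      have hCval : (C : Int) = (n - 1) / 2 := by
        rw [hC, if_pos h3n]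
        have : (0:Int) ≤ (n + 1 - 3 + 2 - 1) / 2 := Int.ediv_nonneg (by omega) (by norm_num)
        omega
      have hLn : 3 + 2 * (j : Int) ≤ n := by omega
      set dj := (List.range j).foldl (fun d (k : Nat) => pvBodyL cs d (3 + 2 * (k : Int))) d with hdj
      have hprev : pvInv cs dj (3 + 2 * (j : Int) - 2) := by
        have harg : 3 + 2 * (j : Int) - 2 = 2 * (j : Int) + 1 := by ring
        rw [harg]
        exact ihj (by omega)
      have hstep := pvStepI cs dj (3 + 2 * (j : Int)) (by omega) hLn (by omega) hprev
      have harg2 : (2 * (((j + 1) : Nat) : Int) + 1) = 3 + 2 * (j : Int) := by push_cast; ring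
      rw [harg2]
      exact hstep
  refine ⟨2 * (C : Int) + 1, ?_, aux C le_rfl⟩
  intro hodd
  by_cases h3n : 3 < n + 1
  · have : (C : Int) = (n - 1) / 2 := by
      rw [hC, if_pos h3n]
      have : (0:Int) ≤ (n + 1 - 3 + 2 - 1) / 2 := Int.ediv_nonneg (by omega) (by norm_num)
      omega
    omega
  · have : C = 0 := by rw [hC, if_neg h3n]
    have hn2 : n ≤ 2 := by omega
    omega

lemma pv_ports_agree : ∀ s : String, allbinarytrees s = allbinarytrees_alt s := by
  intro s
  simp only [allbinarytrees, allbinarytrees_alt]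
  set cs := s.toList with hcs
  obtain ⟨M, hM, hInv⟩ := pvLoopL cs _ (pv_inv_d1 cs)
  congr 1
  by_cases hpar : cs.length % 2 = 1
  · rw [hInv.1 0 (cs.length : Int) le_rfl (by omega) (by omega) (by omega) (by omega)]
    simp
  · rw [hInv.2 0 (cs.length : Int) (by omega)]
    exact pvAGo_even cs.length cs cs.length le_rfl le_rfl (by omega)

-- ===== VERDICT (by name: the statement is the Claim_ definition above) =====
theorem allbinarytrees_spec : Claim_equal_allbinarytrees := by
  intro s _
  unfold Spec_allbinarytrees
  exact pv_ports_agree s
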